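-- pv_equiv track=rewrite | github.com/ReneFabricius/project-euler | pr147.py | computeForSingleRectangle
-- ===== SOURCE A (Python) =====
-- from math import ceil
--
-- def countPositionsCrossGrid(m, n, k, l):
--     """Spocita pocet moznych umiestneni obdlznika kxl do sikmej mriezky obdlznika mxn, m >= n, k >= l"""
--     if k + l > 2*n:
--         return 0
--
--     symet = (n - ceil(k/2) - ceil(l/2) + 1)*(n + ceil(k/2) - ceil(l/2) - k + 1)
--     limited = (int((m - n)/2) - 1 + ceil(l/2) - int((l - ((m - n) % 2))/2))*(2*n - l - k +1)
--     if limited > 0 or m == n: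
--         symet += limited
--     symet *= 2
--
--     if (m - n + 1) % 2 != l % 2:
--         return symet + 2*n - l - k + 1
--
--     return symet
--
-- def countPositionsNormalGrid(m, n, k, l):
--     if k > m or l > n:
--         return 0
--
--     return (m - k + 1)*(n - l + 1)
--
-- def computeForSingleRectangle(m, n):
--     normal_grid_c = 0
--     for k in range(1, m + 1):
--         for l in range(1, n + 1):
--             normal_grid_c += countPositionsNormalGrid(m, n, k, l)
--
--     cross_grid_c = 0
--     c_m, c_n = m, n
--     if n > m:
--         c_m, c_n = n, m
--
--     for k in range(1, 2*n):
--         l = 1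
--         while l <= k and k + l <= 2*n:
--             c_count = countPositionsCrossGrid(c_m, c_n, k, l)
--             if k != l:
--                 c_count *= 2
--             cross_grid_c += c_count
--             l += 1
--
--     return normal_grid_c, cross_grid_c
-- ===== SOURCE B (Python) =====
-- def _tri(x):
--     return x * (x + 1) // 2 if x > 0 else 0
--
--
-- def computeForSingleRectangle(m, n):
--     # Normal grid: the double sum factors into a product of triangular numbers.
--     normal = _tri(m) * _tri(n)
--
--     # Cross (diagonal) grid: one pass over the long side k of the rectangle;
--     # the inner sum over the short side l is evaluated in closed form.
--     mm, nn = (m, n) if m >= n else (n, m)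
--     d = mm - nn
--     cross = 0
--     for k in range(1, 2 * nn):
--         L = min(k, 2 * nn - k)          # largest admissible short side
--         u = (L + 1) // 2                # number of odd l in 1..L
--         v = L // 2                      # number of even l in 1..L
--         a1 = nn + 1 - (k + 1) // 2
--         a2 = nn + 1 - k // 2
--
--         def q(x):                       # sum_{t=1..x} (a1 - t)(a2 - t)
--             return (x * (x + 1) * (2 * x + 1) // 6
--                     - (a1 + a2) * x * (x + 1) // 2
--                     + a1 * a2 * x)
--
--         g = (2 * (q(u) + q(v))
--              + (d - 1) * (L * (2 * nn + 1 - k) - L * (L + 1) // 2)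
--              + u * (2 * nn + 2 - k) - u * (u + 1))
--         s = 2 * g
--         if k <= nn:                     # the square l == k was doubled; undo once
--             s -= (2 * (a1 - (k + 1) // 2) * (a2 - (k + 1) // 2)
--                   + (d - 1 + k % 2) * (2 * nn + 1 - 2 * k))
--         cross += s
--     return normal, cross
-- ===== Notes on version B (the rewrite author's own statement) =====
-- stated objective: faster
-- what changed: The normal-grid double loop is replaced by the closed-form product of triangular numbers, and the cross-grid k,l double loop by a single pass over k whose inner sum over l is evaluated in closed form (after proving the conditional 'limited' add of A always equals an unconditional add).
import Mathlib
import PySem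

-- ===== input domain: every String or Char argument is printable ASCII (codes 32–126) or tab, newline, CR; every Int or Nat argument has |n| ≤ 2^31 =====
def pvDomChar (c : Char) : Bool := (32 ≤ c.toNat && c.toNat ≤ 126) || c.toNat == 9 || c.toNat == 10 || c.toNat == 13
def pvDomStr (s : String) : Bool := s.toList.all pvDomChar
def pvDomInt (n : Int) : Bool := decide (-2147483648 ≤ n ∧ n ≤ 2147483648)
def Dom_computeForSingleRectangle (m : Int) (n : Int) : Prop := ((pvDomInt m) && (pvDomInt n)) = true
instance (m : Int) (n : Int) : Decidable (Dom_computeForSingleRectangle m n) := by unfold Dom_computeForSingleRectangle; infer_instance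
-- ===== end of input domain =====

-- B replaces A's O(m*n + n^2) double loops by a closed-form product for the normal
-- grid and a single O(n) pass with a closed-form inner sum for the diagonal grid.

-- ===== PORT A =====
-- math.ceil(x/2): the float x/2 is exact for every argument reachable here (|x| < 2^53)
def pvCeilHalf (x : Int) : Int := -(PySem.Int.floordiv (-x) 2)
-- int(x/2): truncation toward zero; every call below passes 0 ≤ x, where truncation = floor
def pvTruncHalf (x : Int) : Int := PySem.Int.floordiv x 2

def countPositionsCrossGrid (m : Int) (n : Int) (k : Int) (l : Int) : Int :=
  if 2 * n < k + l then 0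
  else
    let symet := (n - pvCeilHalf k - pvCeilHalf l + 1) * (n + pvCeilHalf k - pvCeilHalf l - k + 1)
    let limited := (pvTruncHalf (m - n) - 1 + pvCeilHalf l
        - pvTruncHalf (l - PySem.Int.mod (m - n) 2)) * (2 * n - l - k + 1)
    let symet := if 0 < limited ∨ m = n then symet + limited else symet
    let symet := symet * 2
    if PySem.Int.mod (m - n + 1) 2 ≠ PySem.Int.mod l 2 then symet + 2 * n - l - k + 1 else symet

def countPositionsNormalGrid (m : Int) (n : Int) (k : Int) (l : Int) : Int :=
  if m < k ∨ n < l then 0 else (m - k + 1) * (n - l + 1)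

-- the inner 'while l <= k and k + l <= 2*n' loop of A
def pvCrossWhile (cm : Int) (cn : Int) (n : Int) (k : Int) (l : Int) (acc : Int) : Int :=
  if h : l ≤ k ∧ k + l ≤ 2 * n then
    let c0 := countPositionsCrossGrid cm cn k l
    let c := if k ≠ l then c0 * 2 else c0
    pvCrossWhile cm cn n k (l + 1) (acc + c)
  else acc
termination_by (k + 1 - l).toNat
decreasing_by omega

def computeForSingleRectangle (m : Int) (n : Int) : Int × Int :=
  let normal := (PySem.List.pyRange 1 (m + 1) 1).foldl
    (fun acc k => (PySem.List.pyRange 1 (n + 1) 1).foldl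
      (fun acc2 l => acc2 + countPositionsNormalGrid m n k l) acc) 0
  let cm := if m < n then n else m
  let cn := if m < n then m else n
  let cross := (PySem.List.pyRange 1 (2 * n) 1).foldl
    (fun acc k => pvCrossWhile cm cn n k 1 acc) 0
  (normal, cross)

-- ===== PORT B =====
def pvTri (x : Int) : Int := if 0 < x then PySem.Int.floordiv (x * (x + 1)) 2 else 0

-- sum_{t=1..x} (a1 - t)(a2 - t), closed form
def pvQ (a1 : Int) (a2 : Int) (x : Int) : Int :=
  PySem.Int.floordiv (x * (x + 1) * (2 * x + 1)) 6
    - PySem.Int.floordiv ((a1 + a2) * x * (x + 1)) 2 + a1 * a2 * x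

-- closed-form inner sum of the cross-grid count for one long side k
def pvCrossTerm (nn : Int) (d : Int) (k : Int) : Int :=
  let L := min k (2 * nn - k)
  let u := PySem.Int.floordiv (L + 1) 2
  let v := PySem.Int.floordiv L 2
  let a1 := nn + 1 - PySem.Int.floordiv (k + 1) 2
  let a2 := nn + 1 - PySem.Int.floordiv k 2
  let g := 2 * (pvQ a1 a2 u + pvQ a1 a2 v)
      + (d - 1) * (L * (2 * nn + 1 - k) - PySem.Int.floordiv (L * (L + 1)) 2)
      + u * (2 * nn + 2 - k) - u * (u + 1)
  let s := 2 * g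
  if k ≤ nn then
    s - (2 * (a1 - PySem.Int.floordiv (k + 1) 2) * (a2 - PySem.Int.floordiv (k + 1) 2)
         + (d - 1 + PySem.Int.mod k 2) * (2 * nn + 1 - 2 * k))
  else s

def computeForSingleRectangle_alt (m : Int) (n : Int) : Int × Int :=
  let normal := pvTri m * pvTri n
  let mm := if m ≥ n then m else n
  let nn := if m ≥ n then n else m
  let d := mm - nn
  let cross := (PySem.List.pyRange 1 (2 * nn) 1).foldl
    (fun acc k => acc + pvCrossTerm nn d k) 0
  (normal, cross)

-- ===== PRECONDITION & SPEC =====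
def Spec_computeForSingleRectangle (m : Int) (n : Int) (out : Int × Int) : Prop := out = computeForSingleRectangle_alt m n
instance (m : Int) (n : Int) (out : Int × Int) : Decidable (Spec_computeForSingleRectangle m n out) := by unfold Spec_computeForSingleRectangle; infer_instance

-- ===== CLAIM (what is proved, stated in full; the proofs are below) =====
def Claim_equal_computeForSingleRectangle : Prop := ∀ (m : Int) (n : Int), Dom_computeForSingleRectangle m n → Spec_computeForSingleRectangle m n (computeForSingleRectangle m n)

-- ===== LEMMAS AND PROOFS =====

-- the simplified per-cell cross-grid count (proof-side only)
def pvCVal (nn : Int) (d : Int) (k : Int) (l : Int) : Int :=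
  2 * (nn + 1 - (k + 1) / 2 - (l + 1) / 2) * (nn + 1 - (k - (k + 1) / 2) - (l + 1) / 2)
    + (d - 1 + l % 2) * (2 * nn + 1 - k - l)

-- pvQ written with Int.ediv (proof-side twin of pvQ)
def pvQe (a1 : Int) (a2 : Int) (x : Int) : Int :=
  x * (x + 1) * (2 * x + 1) / 6 - (a1 + a2) * x * (x + 1) / 2 + a1 * a2 * x

-- closed-form partial sum  sum_{l=1..L} pvCVal nn d k l  (proof-side only)
def pvGp (nn : Int) (d : Int) (k : Int) (L : Int) : Int :=
  2 * (pvQe (nn + 1 - (k + 1) / 2) (nn + 1 - (k - (k + 1) / 2)) ((L + 1) / 2)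
       + pvQe (nn + 1 - (k + 1) / 2) (nn + 1 - (k - (k + 1) / 2)) (L / 2))
    + (d - 1) * (L * (2 * nn + 1 - k) - L * (L + 1) / 2)
    + ((L + 1) / 2) * (2 * nn + 2 - k) - ((L + 1) / 2) * ((L + 1) / 2 + 1)

lemma pvCrossGuard (cm cn k l : Int) (h : 2 * cn < k + l) :
    countPositionsCrossGrid cm cn k l = 0 := by
  unfold countPositionsCrossGrid
  rw [if_pos h]

lemma pv_two_dvd (x : Int) : ∃ c, x * (x + 1) = 2 * c := by
  rcases Int.even_or_odd x with ⟨t, rfl⟩ | ⟨t, rfl⟩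
  · exact ⟨t * (t + t + 1), by ring⟩
  · exact ⟨(2 * t + 1) * (t + 1), by ring⟩

lemma pv_six_dvd (x : Int) : ∃ c, x * (x + 1) * (2 * x + 1) = 6 * c := by
  obtain ⟨e, he⟩ := pv_two_dvd x
  have hm : x % 3 = 0 ∨ x % 3 = 1 ∨ x % 3 = 2 := by omega
  have h3 : (3:Int) ∣ x ∨ (3:Int) ∣ (x + 1) ∨ (3:Int) ∣ (2 * x + 1) := by
    rcases hm with h | h | h
    · exact Or.inl (by omega)
    · exact Or.inr (Or.inr (by omega))
    · exact Or.inr (Or.inl (by omega))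
  have h3' : (3:Int) ∣ x * (x + 1) * (2 * x + 1) := by
    rcases h3 with ⟨t, ht⟩ | ⟨t, ht⟩ | ⟨t, ht⟩
    · exact ⟨t * (x + 1) * (2 * x + 1), by rw [ht]; ring⟩
    · exact ⟨x * t * (2 * x + 1), by rw [ht]; ring⟩
    · exact ⟨x * (x + 1) * t, by rw [ht]; ring⟩
  have h2' : (2:Int) ∣ x * (x + 1) * (2 * x + 1) := ⟨e * (2 * x + 1), by rw [he]; ring⟩
  have h6 : (6:Int) ∣ x * (x + 1) * (2 * x + 1) := by omega
  obtain ⟨c, hc⟩ := h6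
  exact ⟨c, hc⟩

lemma pvQe_succ (a1 a2 x : Int) :
    pvQe a1 a2 (x + 1) = pvQe a1 a2 x + (a1 - (x + 1)) * (a2 - (x + 1)) := by
  obtain ⟨c, hc⟩ := pv_six_dvd x
  obtain ⟨e, he⟩ := pv_two_dvd x
  unfold pvQe
  rw [show (x+1) * (x+1+1) * (2*(x+1)+1) = 6 * (c + (x+1)^2) by linear_combination hc,
      show (a1 + a2) * (x+1) * (x+1+1) = 2 * ((a1+a2) * (e + x + 1)) by linear_combination (a1+a2) * he,
      show x * (x+1) * (2*x+1) = 6 * c from hc,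
      show (a1 + a2) * x * (x+1) = 2 * ((a1+a2) * e) by linear_combination (a1+a2) * he,
      Int.mul_ediv_cancel_left _ (by norm_num : (6:Int) ≠ 0),
      Int.mul_ediv_cancel_left _ (by norm_num : (6:Int) ≠ 0),
      Int.mul_ediv_cancel_left _ (by norm_num : (2:Int) ≠ 0),
      Int.mul_ediv_cancel_left _ (by norm_num : (2:Int) ≠ 0)]
  ring

lemma pvGp_zero (nn d k : Int) : pvGp nn d k 0 = 0 := by
  unfold pvGp pvQe; norm_num

lemma pvGp_succ (nn d k L : Int) (hL : 0 ≤ L) :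
    pvGp nn d k (L + 1) = pvGp nn d k L + pvCVal nn d k (L + 1) := by
  unfold pvGp pvCVal
  rcases Int.even_or_odd L with ⟨t, rfl⟩ | ⟨t, rfl⟩
  · -- L = t + t (even), L + 1 = t + t + 1
    have h1 : (t + t + 1 + 1) / 2 = t + 1 := by omega
    have h2 : (t + t + 1) / 2 = t := by omega
    have h3 : (t + t) / 2 = t := by omega
    have h4 : (t + t + 1) % 2 = 1 := by omega
    have h5 : (t + t + 1) * (t + t + 1 + 1) = 2 * ((2 * t + 1) * (t + 1)) := by ring
    have h6 : (t + t) * (t + t + 1) = 2 * (t * (2 * t + 1)) := by ring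
    rw [h1, h2, h3, h4, h5, h6,
      Int.mul_ediv_cancel_left _ (by norm_num : (2:Int) ≠ 0),
      Int.mul_ediv_cancel_left _ (by norm_num : (2:Int) ≠ 0),
      pvQe_succ]
    ring
  · -- L = 2t + 1 (odd), L + 1 = 2t + 2
    have h1 : (2 * t + 1 + 1 + 1) / 2 = t + 1 := by omega
    have h2 : (2 * t + 1 + 1) / 2 = t + 1 := by omega
    have h3 : (2 * t + 1) / 2 = t := by omega
    have h4 : (2 * t + 1 + 1) % 2 = 0 := by omega
    have h5 : (2 * t + 1 + 1) * (2 * t + 1 + 1 + 1) = 2 * ((t + 1) * (2 * t + 3)) := by ring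
    have h6 : (2 * t + 1) * (2 * t + 1 + 1) = 2 * ((2 * t + 1) * (t + 1)) := by ring
    rw [h1, h2, h3, h4, h5, h6,
      Int.mul_ediv_cancel_left _ (by norm_num : (2:Int) ≠ 0),
      Int.mul_ediv_cancel_left _ (by norm_num : (2:Int) ≠ 0),
      pvQe_succ]
    ring

lemma pvCross_simpl (cm cn k l : Int) (hmn : cn ≤ cm) (hk : 1 ≤ k) (hl : 1 ≤ l)
    (hkl : k + l ≤ 2 * cn) :
    countPositionsCrossGrid cm cn k l = pvCVal cn (cm - cn) k l := by
  unfold countPositionsCrossGrid pvCeilHalf pvTruncHalf pvCVal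
  rw [if_neg (by omega)]
  simp only [PySem.Int.floordiv_eq_ediv_of_pos (by norm_num : (0:Int) < 2),
    PySem.Int.mod_eq_emod_of_pos (by norm_num : (0:Int) < 2)]
  have hck : -(-k / 2) = (k + 1) / 2 := by omega
  have hcl : -(-l / 2) = (l + 1) / 2 := by omega
  rw [hck, hcl]
  have hpos : 0 < 2 * cn - l - k + 1 := by omega
  rcases Int.even_or_odd (cm - cn) with ⟨s, hs⟩ | ⟨s, hs⟩ <;>
    rcases Int.even_or_odd l with ⟨t, rfl⟩ | ⟨t, rfl⟩
  -- case split on the parities of cm - cn and l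
  · -- d even, l even
    rw [hs]
    have e1 : (s + s) % 2 = 0 := by omega
    have e2 : (t + t + 1) / 2 = t := by omega
    have e3 : (t + t) % 2 = 0 := by omega
    have e4 : (s + s + 1) % 2 = 1 := by omega
    rw [e1, e3, e4, sub_zero]
    have e5 : (t + t) / 2 = t := by omega
    have e6 : (s + s) / 2 = s := by omega
    rw [e2, e5, e6, if_pos (by omega)]
    by_cases hb : 0 < (s - 1 + t - t) * (2 * cn - (t + t) - k + 1) ∨ cm = cn
    · rw [if_pos hb]; ring
    · rw [if_neg hb]
      push Not at hb
      have hs1 : 1 ≤ s := by omega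
      have hs2 : s = 1 := by
        by_contra hc
        exact absurd (mul_pos (by omega : (0:Int) < s - 1 + t - t) (by omega : (0:Int) < 2 * cn - (t + t) - k + 1)) (by omega)
      rw [hs2]; ring
  · -- d even, l odd
    rw [hs]
    have e1 : (s + s) % 2 = 0 := by omega
    have e2 : (2 * t + 1 + 1) / 2 = t + 1 := by omega
    have e3 : (2 * t + 1) % 2 = 1 := by omega
    have e4 : (s + s + 1) % 2 = 1 := by omega
    rw [e1, e3, e4, sub_zero]
    have e5 : (2 * t + 1) / 2 = t := by omega
    have e6 : (s + s) / 2 = s := by omega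
    rw [e2, e5, e6, if_neg (by omega)]
    by_cases hb : 0 < (s - 1 + (t + 1) - t) * (2 * cn - (2 * t + 1) - k + 1) ∨ cm = cn
    · rw [if_pos hb]; ring
    · exfalso
      push Not at hb
      have hs1 : 1 ≤ s := by omega
      exact absurd (mul_pos (by omega : (0:Int) < s - 1 + (t + 1) - t) (by omega : (0:Int) < 2 * cn - (2 * t + 1) - k + 1)) (by omega)
  · -- d odd, l even
    rw [hs]
    have e1 : (2 * s + 1) % 2 = 1 := by omega
    have e2 : (t + t + 1) / 2 = t := by omega
    have e3 : (t + t) % 2 = 0 := by omega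
    have e4 : (2 * s + 1 + 1) % 2 = 0 := by omega
    rw [e1, e3, e4]
    have e5 : (t + t - 1) / 2 = t - 1 := by omega
    have e6 : (2 * s + 1) / 2 = s := by omega
    rw [e2, e5, e6, if_neg (by omega)]
    by_cases hb : 0 < (s - 1 + t - (t - 1)) * (2 * cn - (t + t) - k + 1) ∨ cm = cn
    · rw [if_pos hb]; ring
    · rw [if_neg hb]
      push Not at hb
      have hs2 : s = 0 := by
        by_contra hc
        exact absurd (mul_pos (by omega : (0:Int) < s - 1 + t - (t - 1)) (by omega : (0:Int) < 2 * cn - (t + t) - k + 1)) (by omega)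
      rw [hs2]; ring
  · -- d odd, l odd
    rw [hs]
    have e1 : (2 * s + 1) % 2 = 1 := by omega
    have e2 : (2 * t + 1 + 1) / 2 = t + 1 := by omega
    have e3 : (2 * t + 1) % 2 = 1 := by omega
    have e4 : (2 * s + 1 + 1) % 2 = 0 := by omega
    rw [e1, e3, e4]
    have e5 : (2 * t + 1 - 1) / 2 = t := by omega
    have e6 : (2 * s + 1) / 2 = s := by omega
    rw [e2, e5, e6, if_pos (by omega)]
    by_cases hb : 0 < (s - 1 + (t + 1) - t) * (2 * cn - (2 * t + 1) - k + 1) ∨ cm = cn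
    · rw [if_pos hb]; ring
    · rw [if_neg hb]
      push Not at hb
      have hs2 : s = 0 := by
        by_contra hc
        exact absurd (mul_pos (by omega : (0:Int) < s - 1 + (t + 1) - t) (by omega : (0:Int) < 2 * cn - (2 * t + 1) - k + 1)) (by omega)
      rw [hs2]; ring

lemma pvWhile_zero (cm cn n k : Int) :
    ∀ (f : Nat) (l acc : Int), (k + 1 - l).toNat = f → 2 * cn < k + l →
      pvCrossWhile cm cn n k l acc = acc := by
  intro f
  induction f using Nat.strong_induction_on with
  | h f ih =>
    intro l acc hf h
    rw [pvCrossWhile]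
    split
    · next hc =>
      have hc0 : countPositionsCrossGrid cm cn k l = 0 := pvCrossGuard _ _ _ _ (by omega)
      simp only [hc0, zero_mul, ite_self, add_zero]
      exact ih (k + 1 - (l + 1)).toNat (by omega) (l + 1) acc rfl (by omega)
    · rfl

lemma pvWhile_main (cm cn n k : Int) (hmn : cn ≤ cm) (hn : cn ≤ n) (hk : 1 ≤ k)
    (hk2 : k < 2 * cn) :
    ∀ (f : Nat) (l acc : Int), (min k (2 * cn - k) + 1 - l).toNat = f → 1 ≤ l →
      l ≤ min k (2 * cn - k) + 1 →
      pvCrossWhile cm cn n k l acc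
        = acc + 2 * (pvGp cn (cm - cn) k (min k (2 * cn - k)) - pvGp cn (cm - cn) k (l - 1))
          - (if l ≤ k ∧ k ≤ cn then pvCVal cn (cm - cn) k k else 0) := by
  intro f
  induction f using Nat.strong_induction_on with
  | h f ih =>
    intro l acc hf h1 h2
    by_cases hend : l ≤ min k (2 * cn - k)
    · have hcond : l ≤ k ∧ k + l ≤ 2 * n := by omega
      rw [pvCrossWhile, dif_pos hcond]
      have hcv : countPositionsCrossGrid cm cn k l = pvCVal cn (cm - cn) k l :=
        pvCross_simpl cm cn k l hmn hk h1 (by omega)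
      simp only [hcv]
      have hGstep : pvGp cn (cm - cn) k l
          = pvGp cn (cm - cn) k (l - 1) + pvCVal cn (cm - cn) k l := by
        have h' := pvGp_succ cn (cm - cn) k (l - 1) (by omega)
        simpa using h'
      have IH := ih (min k (2 * cn - k) + 1 - (l + 1)).toNat (by omega) (l + 1)
        (acc + if k ≠ l then pvCVal cn (cm - cn) k l * 2 else pvCVal cn (cm - cn) k l)
        rfl (by omega) (by omega)
      simp only [add_sub_cancel_right] at IH
      rw [IH]
      by_cases hkeq : k = l
      · rw [if_neg (by omega : ¬ k ≠ l)]
        rw [if_neg (by omega : ¬ (l + 1 ≤ k ∧ k ≤ cn)),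
            if_pos (by omega : l ≤ k ∧ k ≤ cn)]
        rw [← hkeq] at hGstep ⊢
        linarith [hGstep]
      · rw [if_pos (by omega : k ≠ l)]
        by_cases hkc : k ≤ cn
        · rw [if_pos (by omega : l + 1 ≤ k ∧ k ≤ cn), if_pos (by omega : l ≤ k ∧ k ≤ cn)]
          linarith [hGstep]
        · rw [if_neg (by omega : ¬ (l + 1 ≤ k ∧ k ≤ cn)),
              if_neg (by omega : ¬ (l ≤ k ∧ k ≤ cn))]
          linarith [hGstep]
    · have hl : l = min k (2 * cn - k) + 1 := by omega
      have hrhs : acc + 2 * (pvGp cn (cm - cn) k (min k (2 * cn - k))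
            - pvGp cn (cm - cn) k (l - 1))
          - (if l ≤ k ∧ k ≤ cn then pvCVal cn (cm - cn) k k else 0) = acc := by
        rw [if_neg (by omega : ¬ (l ≤ k ∧ k ≤ cn)),
            show l - 1 = min k (2 * cn - k) by omega]
        ring
      rw [hrhs]
      by_cases hcond : l ≤ k ∧ k + l ≤ 2 * n
      · exact pvWhile_zero cm cn n k (k + 1 - l).toNat l acc rfl (by omega)
      · rw [pvCrossWhile, dif_neg hcond]

lemma pvCrossTerm_eq (cm cn n k : Int) (hmn : cn ≤ cm) (hn : cn ≤ n) (hk : 1 ≤ k)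
    (hk2 : k < 2 * cn) (acc : Int) :
    pvCrossWhile cm cn n k 1 acc = acc + pvCrossTerm cn (cm - cn) k := by
  rw [pvWhile_main cm cn n k hmn hn hk hk2 (min k (2 * cn - k) + 1 - 1).toNat 1 acc rfl
    (le_refl 1) (by omega)]
  norm_num [pvGp_zero]
  unfold pvCrossTerm pvQ
  simp only [PySem.Int.floordiv_eq_ediv_of_pos (by norm_num : (0:Int) < 2),
    PySem.Int.floordiv_eq_ediv_of_pos (by norm_num : (0:Int) < 6),
    PySem.Int.mod_eq_emod_of_pos (by norm_num : (0:Int) < 2)]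
  rw [show k / 2 = k - (k + 1) / 2 by omega]
  by_cases hkc : k ≤ cn
  · rw [if_pos hkc, if_pos (by omega : 1 ≤ k ∧ k ≤ cn)]
    unfold pvGp pvQe pvCVal
    ring
  · rw [if_neg hkc, if_neg (by omega : ¬ (1 ≤ k ∧ k ≤ cn))]
    unfold pvGp pvQe
    ring

lemma pvTri_double (x : Int) (hx : 0 ≤ x) : 2 * pvTri x = x * (x + 1) := by
  unfold pvTri
  by_cases h : 0 < x
  · rw [if_pos h, PySem.Int.floordiv_eq_ediv_of_pos (by norm_num : (0:Int) < 2)]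
    obtain ⟨c, hc⟩ := pv_two_dvd x
    rw [hc, Int.mul_ediv_cancel_left _ (by norm_num : (2:Int) ≠ 0)]
  · rw [if_neg h, show x = 0 by omega]; ring

lemma pvSum2 (c C : Int) : ∀ b : Int, 1 ≤ b →
    2 * (((PySem.List.pyRange 1 b 1).map (fun l => c * (C - l + 1))).sum)
      = c * (2 * (b - 1) * (C + 1) - (b - 1) * b) := by
  intro b hb
  induction b, hb using Int.le_induction with
  | base => simp [PySem.List.pyRange_one_eq_nil (le_refl (1:Int))]
  | succ b hb1 ih =>
    rw [PySem.List.pyRange_one_succ_right (by omega), List.map_append, List.sum_append]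
    simp only [List.map_cons, List.map_nil, List.sum_cons, List.sum_nil]
    linear_combination ih

lemma pvNormal_eq (m n : Int) :
    (PySem.List.pyRange 1 (m + 1) 1).foldl
      (fun acc k => (PySem.List.pyRange 1 (n + 1) 1).foldl
        (fun acc2 l => acc2 + countPositionsNormalGrid m n k l) acc) 0
      = pvTri m * pvTri n := by
  by_cases hm : 1 ≤ m
  · -- inner loop for k ≤ m equals (m-k+1) * pvTri n
    have hinner : ∀ k acc2, 1 ≤ k → k ≤ m →
        (PySem.List.pyRange 1 (n + 1) 1).foldl
          (fun acc2 l => acc2 + countPositionsNormalGrid m n k l) acc2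
          = acc2 + (m - k + 1) * pvTri n := by
      intro k acc2 hk1 hkm
      by_cases hn : 1 ≤ n
      · have hcong : (PySem.List.pyRange 1 (n + 1) 1).foldl
            (fun acc2 l => acc2 + countPositionsNormalGrid m n k l) acc2
            = (PySem.List.pyRange 1 (n + 1) 1).foldl
              (fun acc2 l => acc2 + (m - k + 1) * (n - l + 1)) acc2 := by
          apply PySem.List.foldl_congr_mem
          intro a x hx
          rw [PySem.List.mem_pyRange_one] at hx
          unfold countPositionsNormalGrid
          rw [if_neg (by omega)]
        rw [hcong, PySem.List.foldl_add]
        have h2 := pvSum2 (m - k + 1) n (n + 1) (by omega)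
        have hT := pvTri_double n (by omega)
        have : 2 * (((PySem.List.pyRange 1 (n + 1) 1).map
            (fun l => (m - k + 1) * (n - l + 1))).sum) = 2 * ((m - k + 1) * pvTri n) := by
          rw [h2]; linear_combination -(m - k + 1) * hT
        omega
      · rw [PySem.List.pyRange_one_eq_nil (by omega : (n:Int) + 1 ≤ 1)]
        simp [pvTri, show ¬ (0 < n) from by omega]
    -- outer loop
    have hout : ∀ b acc, 1 ≤ b → b ≤ m + 1 →
        (PySem.List.pyRange 1 b 1).foldl
          (fun acc k => (PySem.List.pyRange 1 (n + 1) 1).foldl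
            (fun acc2 l => acc2 + countPositionsNormalGrid m n k l) acc) acc
          = acc + (((PySem.List.pyRange 1 b 1).map (fun k => pvTri n * (m - k + 1))).sum) := by
      intro b acc hb1 hbm
      have hcong : (PySem.List.pyRange 1 b 1).foldl
          (fun acc k => (PySem.List.pyRange 1 (n + 1) 1).foldl
            (fun acc2 l => acc2 + countPositionsNormalGrid m n k l) acc) acc
          = (PySem.List.pyRange 1 b 1).foldl
            (fun acc k => acc + pvTri n * (m - k + 1)) acc := by
        apply PySem.List.foldl_congr_mem
        intro a x hx
        rw [PySem.List.mem_pyRange_one] at hx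
        rw [hinner x a hx.1 (by omega)]
        ring
      rw [hcong, PySem.List.foldl_add]
    rw [hout (m + 1) 0 (by omega) (le_refl _)]
    have h2 := pvSum2 (pvTri n) m (m + 1) (by omega)
    have hT := pvTri_double m (by omega)
    have : 2 * (((PySem.List.pyRange 1 (m + 1) 1).map
        (fun k => pvTri n * (m - k + 1))).sum) = 2 * (pvTri m * pvTri n) := by
      rw [h2]; linear_combination -(pvTri n) * hT
    omega
  · rw [PySem.List.pyRange_one_eq_nil (by omega : (m:Int) + 1 ≤ 1)]
    simp [pvTri, show ¬ (0 < m) from by omega]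

lemma pvCross_eq (m n cm cn : Int) (hcm : cm = if m < n then n else m)
    (hcn : cn = if m < n then m else n) :
    (PySem.List.pyRange 1 (2 * n) 1).foldl (fun acc k => pvCrossWhile cm cn n k 1 acc) 0
      = (PySem.List.pyRange 1 (2 * cn) 1).foldl
          (fun acc k => acc + pvCrossTerm cn (cm - cn) k) 0 := by
  have h1 : cn ≤ cm := by rw [hcm, hcn]; split_ifs <;> omega
  have h2 : cn ≤ n := by rw [hcn]; split_ifs <;> omega
  by_cases hc1 : 1 ≤ cn
  · rw [PySem.List.pyRange_one_append 1 (2 * cn) (2 * n) (by omega) (by omega),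
      List.foldl_append]
    have hA : (PySem.List.pyRange 1 (2 * cn) 1).foldl
        (fun acc k => pvCrossWhile cm cn n k 1 acc) 0
        = (PySem.List.pyRange 1 (2 * cn) 1).foldl
          (fun acc k => acc + pvCrossTerm cn (cm - cn) k) 0 := by
      apply PySem.List.foldl_congr_mem
      intro a x hx
      rw [PySem.List.mem_pyRange_one] at hx
      exact pvCrossTerm_eq cm cn n x h1 h2 hx.1 hx.2 a
    have hz : ∀ (a x : Int), x ∈ PySem.List.pyRange (2 * cn) (2 * n) 1 →
        pvCrossWhile cm cn n x 1 a = a := by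
      intro a x hx
      rw [PySem.List.mem_pyRange_one] at hx
      exact pvWhile_zero cm cn n x (x + 1 - 1).toNat 1 a rfl (by omega)
    have hB : ∀ X, (PySem.List.pyRange (2 * cn) (2 * n) 1).foldl
        (fun acc k => pvCrossWhile cm cn n k 1 acc) X = X := by
      intro X
      rw [PySem.List.foldl_congr_mem _ _ (fun acc _ => acc) _ hz]
      exact PySem.List.foldl_ignore _ _
    rw [hB, hA]
  · rw [PySem.List.pyRange_one_eq_nil (by omega : 2 * cn ≤ 1)]
    simp only [List.foldl_nil]
    have hz : ∀ (a x : Int), x ∈ PySem.List.pyRange 1 (2 * n) 1 →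
        pvCrossWhile cm cn n x 1 a = a := by
      intro a x hx
      rw [PySem.List.mem_pyRange_one] at hx
      exact pvWhile_zero cm cn n x (x + 1 - 1).toNat 1 a rfl (by omega)
    rw [PySem.List.foldl_congr_mem _ _ (fun acc _ => acc) _ hz]
    exact PySem.List.foldl_ignore _ _

-- ===== VERDICT (by name: the statement is the Claim_ definition above) =====
theorem computeForSingleRectangle_spec : Claim_equal_computeForSingleRectangle := by
  intro m n _
  unfold Spec_computeForSingleRectangle computeForSingleRectangle computeForSingleRectangle_alt
  dsimp only
  refine Prod.ext ?_ ?_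
  · exact pvNormal_eq m n
  · have e1 : (if m ≥ n then n else m) = (if m < n then m else n) := by split_ifs <;> omega
    have e2 : (if m ≥ n then m else n) = (if m < n then n else m) := by split_ifs <;> omega
    rw [e1, e2]
    exact pvCross_eq m n _ _ rfl rfl
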